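-- pv_equiv track=rewrite | github.com/pawlowiczf/ASD-2022-2023 | Programowanie dynamiczne 2022,2023/cwiczenia 22.06/wieze.py | Towers
-- ===== SOURCE A (Python) =====
-- def right(a): return 2 * a + 2
--
-- def left(a): return 2 * a + 1
--
-- def parent(a): return ( a - 1 ) // 2
--
-- def Heapify(T, a, n):
--     #
--     maxInd = a
--     r = right(a)
--     l = left(a)
--
--     if r < n and T[r].height > T[maxInd].height: maxInd = r
--     if l < n and T[l].height > T[maxInd].height: maxInd = l
--
--     if maxInd != a:
--         Heapify(T, maxInd, n)
--
-- def BuildHeap(T):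
--     #
--     n = len(T)
--
--     for a in range( parent(n - 1), -1, -1 ):
--         Heapify(T, a, n)
--
-- def getMaximum(B, T, t):
--     #
--     Node = T[0]
--     index = Node.id
--
--     Node.height -= B[index][-1]
--     value = B[index][-1]
--
--     B[index].pop(-1)
--
--     if Node.height < t:
--         T[0], T[-1] = T[-1], T[0]
--         T.pop(-1)
--     #
--
--     Heapify( T, 0, len(T) )
--     return index, value
--
-- class Height:
--     def __init__(self, id, height):
--         self.id = id
--         self.height = height
--
-- def Towers(B, W, t): # B - klocki pozostalych dzieci, W - klocki naszego 'zlodzieja'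
--     #
--     n = len(B)
--     for array in B: array.sort()
--
--     HeightTowers = [ sum( B[a] ) for a in range(n) ]
--     Heap = [ Height(a, HeightTowers[a]) for a in range(n) if HeightTowers[a] >= t ]
--     ourHeight = sum(W)
--     BuildHeap(Heap)
--
--     count = 0
--     while Heap:
--         #
--         index, maxBlock = getMaximum(B, Heap, t)
--         HeightTowers[index] -= maxBlock
--         ourHeight += maxBlock
--         count += 1
--
--
--     #end 'while' loop
--
--     valArray = []
--     for array in B:
--         valArray += array
--     #
--     valArray.sort()
--
--     while valArray and ourHeight < t:
--         ourHeight += valArray[-1]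
--         valArray.pop(-1)
--         count += 1
--     #
--     return count
-- ===== SOURCE B (Python) =====
-- def Towers(B, W, t):
--     # Same return value as A; the no-op heap machinery is dropped: each
--     # qualifying tower is drained in index order (A's processing order does
--     # not affect the result). Mutates the inner lists of B like A (sorts
--     # them and pops the same blocks).
--     for arr in B:
--         arr.sort()
--     ourHeight = sum(W)
--     count = 0
--     for arr in B:
--         s = sum(arr)
--         while s >= t:
--             x = arr.pop()
--             s -= x
--             ourHeight += x
--             count += 1
--     rest = sorted(x for arr in B for x in arr)
--     for x in reversed(rest):
--         if ourHeight >= t: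
--             break
--         ourHeight += x
--         count += 1
--     return count
-- ===== Notes on version B (the rewrite author's own statement) =====
-- stated objective: simpler
-- what changed: Dropped the Height class and the entire heap machinery (Heapify/BuildHeap/getMaximum) - whose Heapify never swaps, making the 'heap' a plain list processed front-first - and instead drains each tower with sum >= t in index order with a simple inner pop loop, which is valid because each tower is drained independently so processing order cannot affect the result; phase 2 iterates over the sorted leftovers in reverse instead of popping from the list's tail.
import Mathlib
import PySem

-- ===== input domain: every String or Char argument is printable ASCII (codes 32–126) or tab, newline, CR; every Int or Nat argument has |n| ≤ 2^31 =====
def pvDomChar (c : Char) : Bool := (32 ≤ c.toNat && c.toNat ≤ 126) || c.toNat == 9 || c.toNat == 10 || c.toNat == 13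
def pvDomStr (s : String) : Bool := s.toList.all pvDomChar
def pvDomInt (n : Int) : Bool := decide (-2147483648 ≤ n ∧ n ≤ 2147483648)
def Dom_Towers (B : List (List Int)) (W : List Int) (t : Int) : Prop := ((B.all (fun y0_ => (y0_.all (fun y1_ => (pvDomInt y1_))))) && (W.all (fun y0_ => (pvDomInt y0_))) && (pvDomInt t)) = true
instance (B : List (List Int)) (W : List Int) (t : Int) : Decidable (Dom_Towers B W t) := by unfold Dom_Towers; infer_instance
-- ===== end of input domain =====

-- B drops A's heap machinery (whose Heapify never swaps, so it is a no-op) and drains each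
-- qualifying tower in plain index order; equality proved about the return value (both Pythons
-- also mutate B's inner lists identically: sort them and pop the same blocks). Objective: simpler.

-- ===== PORT A =====
def rightA (a : Int) : Int := 2 * a + 2
def leftA (a : Int) : Int := 2 * a + 1
def parentA (a : Int) : Int := PySem.Int.floordiv (a - 1) 2

-- heap nodes Height(id, height) ported as pairs (id, height)
def hgtA (T : List (Int × Int)) (i : Int) : Int := (PySem.List.pyGetD T i (0, 0)).2

-- Python's Heapify only computes maxInd and recurses; it never swaps, so T is never modified.
-- The dite guard only makes the recursion total; in every call a ≥ 0, where maxInd ≠ a implies it.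
def maxIndA (T : List (Int × Int)) (a n : Int) : Int :=
  let r := rightA a
  let l := leftA a
  let m1 := if r < n ∧ hgtA T a < hgtA T r then r else a
  if l < n ∧ hgtA T m1 < hgtA T l then l else m1

def HeapifyA (T : List (Int × Int)) (a n : Int) : List (Int × Int) :=
  if _h : a < maxIndA T a n ∧ maxIndA T a n < n then HeapifyA T (maxIndA T a n) n else T
termination_by (n - a).toNat
decreasing_by omega

def BuildHeapA (T : List (Int × Int)) : List (Int × Int) :=
  let n := (T.length : Int)
  (PySem.List.pyRange (parentA (n - 1)) (-1) (-1)).foldl (fun T a => HeapifyA T a n) T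

-- getMaximum: returns the updated B and heap together with (index, value);
-- none is exactly where the Python raises IndexError (empty heap / emptied tower).
def getMaximumA (Bl : List (List Int)) (T : List (Int × Int)) (t : Int) :
    Option (List (List Int) × List (Int × Int) × Int × Int) :=
  match T with
  | [] => none
  | node :: restT =>
    let index := node.1
    match PySem.List.pyGet? Bl index with
    | none => none
    | some arr =>
      match arr.getLast? with
      | none => none   -- B[index][-1] on an emptied tower: IndexError, excluded by Pre_
      | some value =>
        let node' := (index, node.2 - value)
        match PySem.List.pySet? Bl index arr.dropLast with
        | none => none
        | some Bl' =>
          let T2 := if node'.2 < t then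
                      (match restT.getLast? with
                       | none => []
                       | some lst => lst :: restT.dropLast)
                    else node' :: restT
          some (Bl', HeapifyA T2 0 (T2.length : Int), index, value)

-- termination of the while loop: each successful getMaximum pops one block
theorem sum_len_set_lt : ∀ (Bl : List (List Int)) (j : Nat) (hj : j < Bl.length)
    (ys : List Int), ys.length < (Bl.getD j []).length →
    ((Bl.set j ys).map List.length).sum < (Bl.map List.length).sum := by
  intro Bl
  induction Bl with
  | nil => intro j hj; simp at hj
  | cons a rest ih =>
    intro j hj ys hy
    cases j with
    | zero => simp at hy ⊢; omega
    | succ k =>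
      simp only [List.set_cons_succ, List.map_cons, List.sum_cons]
      have := ih k (by simpa using hj) ys (by simpa using hy)
      omega

theorem getMaximumA_shrink (Bl : List (List Int)) (T : List (Int × Int)) (t : Int)
    (Bl' : List (List Int)) (T' : List (Int × Int)) (i v : Int)
    (h : getMaximumA Bl T t = some (Bl', T', i, v)) :
    (Bl'.map List.length).sum < (Bl.map List.length).sum := by
  match T with
  | [] => simp [getMaximumA] at h
  | node :: restT =>
    simp only [getMaximumA] at h
    cases hg : PySem.List.pyGet? Bl node.1 with
    | none => simp [hg] at h
    | some arr =>
      cases hl : arr.getLast? with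
      | none => simp [hg, hl] at h
      | some value =>
        cases hs : PySem.List.pySet? Bl node.1 arr.dropLast with
        | none => simp [hg, hl, hs] at h
        | some Bl2 =>
          simp only [hg, hl, hs, Option.some.injEq, Prod.mk.injEq] at h
          obtain ⟨hB, -⟩ := h
          subst hB
          have hne : arr ≠ [] := by rintro rfl; simp at hl
          simp only [PySem.List.pyGet?] at hg
          simp only [PySem.List.pySet?] at hs
          cases hk : PySem.List.pyIdx? Bl.length node.1 with
          | none => simp [hk] at hg
          | some k =>
            rw [hk] at hg hs
            simp only [Option.bind_some, Option.map_some, Option.some.injEq] at hg hs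
            have hklt : k < Bl.length := by
              by_contra hc
              rw [List.getElem?_eq_none (by omega)] at hg
              simp at hg
            have harr : Bl[k] = arr := by
              rw [List.getElem?_eq_getElem hklt] at hg
              exact Option.some.inj hg
            rw [← hs]
            refine sum_len_set_lt Bl k hklt arr.dropLast ?_
            rw [List.getD_eq_getElem Bl [] hklt, harr]
            cases arr with | nil => exact absurd rfl hne | cons x xs => simp

def loopA (Bl : List (List Int)) (Heap : List (Int × Int)) (HT : List Int)
    (our cnt t : Int) : List (List Int) × List Int × Int × Int :=
  match Heap with
  | [] => (Bl, HT, our, cnt)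
  | _ :: _ =>
    match h : getMaximumA Bl Heap t with
    | none => (Bl, HT, our, cnt)   -- the Python raises here; unreachable under Pre_
    | some (Bl', T', index, value) =>
      loopA Bl' T' (PySem.List.pySetD HT index (PySem.List.pyGetD HT index 0 - value))
        (our + value) (cnt + 1) t
termination_by (Bl.map List.length).sum
decreasing_by exact getMaximumA_shrink _ _ _ _ _ _ _ h

def loop2A (valArray : List Int) (our cnt t : Int) : Int × Int :=
  if h : valArray ≠ [] ∧ our < t then
    loop2A valArray.dropLast (our + PySem.List.pyGetD valArray (-1) 0) (cnt + 1) t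
  else (our, cnt)
termination_by valArray.length
decreasing_by
  have := List.length_pos_iff.2 h.1
  simp only [List.length_dropLast]
  omega

def Towers (B : List (List Int)) (W : List Int) (t : Int) : Int :=
  let Bs := B.map (fun arr => PySem.List.sorted arr (fun x => x) false)
  let n := Bs.length
  let HeightTowers := (PySem.List.pyRange 0 (n : Int) 1).map
    (fun a => (PySem.List.pyGetD Bs a []).sum)
  let Heap := (PySem.List.pyRange 0 (n : Int) 1).foldl
    (fun acc a => if t ≤ PySem.List.pyGetD HeightTowers a 0
                  then acc ++ [(a, PySem.List.pyGetD HeightTowers a 0)] else acc) []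
  let ourHeight := W.sum
  let Heap := BuildHeapA Heap
  let r := loopA Bs Heap HeightTowers ourHeight 0 t
  let valArray := r.1.foldl (fun acc arr => acc ++ arr) []
  let valArray := PySem.List.sorted valArray (fun x => x) false
  (loop2A valArray r.2.2.1 r.2.2.2 t).2

-- ===== PORT B =====
-- inner 'while s >= t: x = arr.pop(); …' of Source B, returning (remaining, gained, popped)
def stealLoop (arr : List Int) (s t : Int) : List Int × Int × Int :=
  if t ≤ s then
    match hl : arr.getLast? with
    | none => (arr, 0, 0)   -- arr.pop() on an empty list: Python raises; unreachable under Pre_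
    | some x =>
      let r := stealLoop arr.dropLast (s - x) t
      (r.1, r.2.1 + x, r.2.2 + 1)
  else (arr, 0, 0)
termination_by arr.length
decreasing_by
  have : arr ≠ [] := by rintro rfl; simp at hl
  have := List.length_pos_iff.2 this
  simp only [List.length_dropLast]
  omega

-- 'for x in reversed(rest): if our >= t: break; …' of Source B
def loop2B (rest : List Int) (our cnt t : Int) : Int × Int :=
  match rest with
  | [] => (our, cnt)
  | x :: xs => if t ≤ our then (our, cnt) else loop2B xs (our + x) (cnt + 1) t

def Towers_alt (B : List (List Int)) (W : List Int) (t : Int) : Int :=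
  let Bs := B.map (fun arr => PySem.List.sorted arr (fun x => x) false)
  let st := Bs.foldl (fun (acc : List (List Int) × Int × Int) arr =>
      ((acc.1 ++ [(stealLoop arr arr.sum t).1],
        acc.2.1 + (stealLoop arr arr.sum t).2.1,
        acc.2.2 + (stealLoop arr arr.sum t).2.2))) ([], W.sum, 0)
  let rest := PySem.List.sorted (st.1.foldl (fun acc arr => acc ++ arr) []) (fun x => x) false
  (loop2B rest.reverse st.2.1 st.2.2 t).2

-- ===== PRECONDITION & SPEC =====
-- Pre_ excludes exactly the inputs on which A raises IndexError by popping from an emptied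
-- tower: a tower all of whose sorted-prefix sums are ≥ t (possible only when t ≤ 0); B's
-- drain loop raises the same IndexError there.
def Pre_Towers (B : List (List Int)) (W : List Int) (t : Int) : Prop :=
  ∀ arr ∈ B, ∃ k ≤ arr.length, ((PySem.List.sorted arr (fun x => x) false).take k).sum < t
instance (B : List (List Int)) (W : List Int) (t : Int) : Decidable (Pre_Towers B W t) := by
  unfold Pre_Towers; infer_instance

def pvWitness_Towers : List (List Int) × List Int × Int := ([[2, 1], [5]], ([3], 4))

def Spec_Towers (B : List (List Int)) (W : List Int) (t : Int) (out : Int) : Prop := out = Towers_alt B W t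
instance (B : List (List Int)) (W : List Int) (t : Int) (out : Int) : Decidable (Spec_Towers B W t out) := by unfold Spec_Towers; infer_instance

-- ===== CLAIM (what is proved, stated in full; the proofs are below) =====
def Claim_equal_Towers : Prop := ∀ (B : List (List Int)) (W : List Int) (t : Int), Dom_Towers B W t → Pre_Towers B W t → Spec_Towers B W t (Towers B W t)

-- ===== LEMMAS AND PROOFS =====

theorem heapifyA_id (T : List (Int × Int)) (a n : Int) : HeapifyA T a n = T := by
  fun_induction HeapifyA T a n <;> simp_all

theorem foldl_heapify_id (l : List Int) : ∀ (T : List (Int × Int)) (n : Int),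
    l.foldl (fun T a => HeapifyA T a n) T = T := by
  induction l with
  | nil => intro T n; rfl
  | cons x xs ih =>
    intro T n
    simp only [List.foldl_cons]
    rw [show HeapifyA T x n = T from heapifyA_id T x n]
    exact ih T n

theorem buildHeapA_id (T : List (Int × Int)) : BuildHeapA T = T := by
  simp only [BuildHeapA]
  exact foldl_heapify_id _ _ _

-- one-tower drain, started at the tower's own sum
def dsteal (arr : List Int) (t : Int) : List Int × Int × Int := stealLoop arr arr.sum t

theorem sum_dropLast_of_getLast? (arr : List Int) (x : Int) (h : arr.getLast? = some x) :
    arr.dropLast.sum = arr.sum - x := by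
  obtain ⟨l, rfl⟩ := List.getLast?_eq_some_iff.1 h
  simp

theorem dsteal_lt (arr : List Int) (t : Int) (h : arr.sum < t) : dsteal arr t = (arr, 0, 0) := by
  unfold dsteal; rw [stealLoop]; rw [if_neg (by omega)]

theorem dsteal_ge (arr : List Int) (t x : Int) (h : t ≤ arr.sum) (hl : arr.getLast? = some x) :
    dsteal arr t = ((dsteal arr.dropLast t).1, (dsteal arr.dropLast t).2.1 + x,
                    (dsteal arr.dropLast t).2.2 + 1) := by
  have hd : arr.sum - x = arr.dropLast.sum := by
    rw [sum_dropLast_of_getLast? arr x hl]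
  unfold dsteal
  rw [stealLoop, if_pos h]
  split
  · next heq => rw [hl] at heq; simp at heq
  · next y heq =>
    rw [hl] at heq
    obtain rfl : x = y := Option.some.inj heq
    rw [hd]

-- the drain of arr terminates with no empty pop: some prefix sum is < t
def DOK (arr : List Int) (t : Int) : Prop := ∃ k ≤ arr.length, (arr.take k).sum < t

theorem DOK_ne_nil {arr : List Int} {t : Int} (h : DOK arr t) (hs : t ≤ arr.sum) : arr ≠ [] := by
  rintro rfl
  obtain ⟨k, hk, hlt⟩ := h
  simp at hs hlt
  omega

theorem DOK_dropLast {arr : List Int} {t : Int} (h : DOK arr t) (hs : t ≤ arr.sum) :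
    DOK arr.dropLast t := by
  obtain ⟨k, hk, hlt⟩ := h
  have hne : arr ≠ [] := DOK_ne_nil ⟨k, hk, hlt⟩ hs
  have hklt : k < arr.length := by
    rcases Nat.lt_or_ge k arr.length with h' | h'
    · exact h'
    · exfalso; have : k = arr.length := by omega
      subst this; rw [List.take_length] at hlt; omega
  refine ⟨k, ?_, ?_⟩
  · simp [List.length_dropLast]; omega
  · rw [List.dropLast_eq_take, List.take_take]
    have : min k (arr.length - 1) = k := by omega
    rw [this]; exact hlt

-- loop invariant of A's while loop
def InvA (Bl : List (List Int)) (H : List (Int × Int)) (t : Int) : Prop :=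
  (H.map Prod.fst).Nodup ∧
  ∀ nd ∈ H, 0 ≤ nd.1 ∧ nd.1.toNat < Bl.length ∧ nd.2 = (Bl.getD nd.1.toNat []).sum ∧
    t ≤ nd.2 ∧ DOK (Bl.getD nd.1.toNat []) t

def idsOf (H : List (Int × Int)) : List Int := H.map Prod.fst

def applySteal (Bl : List (List Int)) (ids : List Int) (t : Int) : List (List Int) :=
  Bl.mapIdx (fun j a => if (j : Int) ∈ ids then (dsteal a t).1 else a)

def gainSum (Bl : List (List Int)) (H : List (Int × Int)) (t : Int) : Int :=
  (H.map (fun nd => (dsteal (Bl.getD nd.1.toNat []) t).2.1)).sum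

def cntSum (Bl : List (List Int)) (H : List (Int × Int)) (t : Int) : Int :=
  (H.map (fun nd => (dsteal (Bl.getD nd.1.toNat []) t).2.2)).sum


theorem getD_set_ne (Bl : List (List Int)) (j k : Nat) (v : List Int) (h : j ≠ k) :
    (Bl.set j v).getD k [] = Bl.getD k [] := by
  simp [List.getD, List.getElem?_set_ne h]

theorem getD_set_self (Bl : List (List Int)) (j : Nat) (v : List Int) (h : j < Bl.length) :
    (Bl.set j v).getD j [] = v := by
  simp [List.getD, h]

theorem applySteal_congr (Bl : List (List Int)) (ids1 ids2 : List Int) (t : Int)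
    (h : ∀ x, x ∈ ids1 ↔ x ∈ ids2) : applySteal Bl ids1 t = applySteal Bl ids2 t := by
  unfold applySteal
  apply List.ext_getElem (by simp)
  intro j h1 h2
  simp only [List.getElem_mapIdx]
  by_cases hm : (j : Int) ∈ ids1
  · rw [if_pos hm, if_pos ((h _).1 hm)]
  · rw [if_neg hm, if_neg (fun hc => hm ((h _).2 hc))]

theorem getMaximumA_spec (Bl : List (List Int)) (nd : Int × Int) (rest : List (Int × Int))
    (t : Int) (h0 : 0 ≤ nd.1) (h1 : nd.1.toNat < Bl.length)
    (hne : Bl.getD nd.1.toNat [] ≠ []) :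
    getMaximumA Bl (nd :: rest) t =
      some (Bl.set nd.1.toNat (Bl.getD nd.1.toNat []).dropLast,
            (if nd.2 - (Bl.getD nd.1.toNat []).getLast hne < t then
               (match rest.getLast? with
                | none => ([] : List (Int × Int))
                | some lst => lst :: rest.dropLast)
             else (nd.1, nd.2 - (Bl.getD nd.1.toNat []).getLast hne) :: rest),
            nd.1, (Bl.getD nd.1.toNat []).getLast hne) := by
  have hidx : PySem.List.pyIdx? Bl.length nd.1 = some nd.1.toNat := by
    simp only [PySem.List.pyIdx?, if_pos h0]
    rw [if_pos (by omega)]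
  have hget : PySem.List.pyGet? Bl nd.1 = some (Bl.getD nd.1.toNat []) := by
    simp only [PySem.List.pyGet?, hidx, Option.bind_some]
    rw [List.getElem?_eq_getElem h1, List.getD_eq_getElem Bl [] h1]
  have hset : PySem.List.pySet? Bl nd.1 (Bl.getD nd.1.toNat []).dropLast
      = some (Bl.set nd.1.toNat (Bl.getD nd.1.toNat []).dropLast) := by
    simp only [PySem.List.pySet?, hidx, Option.map_some]
  have hlast : (Bl.getD nd.1.toNat []).getLast? = some ((Bl.getD nd.1.toNat []).getLast hne) :=
    List.getLast?_eq_some_getLast hne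
  simp only [getMaximumA, hget, hlast, hset, heapifyA_id]

theorem loopA_char_aux (t : Int) : ∀ (N : Nat) (Bl : List (List Int)) (H : List (Int × Int))
    (HT : List Int) (our cnt : Int), (Bl.map List.length).sum ≤ N → InvA Bl H t →
    (loopA Bl H HT our cnt t).1 = applySteal Bl (idsOf H) t ∧
    (loopA Bl H HT our cnt t).2.2.1 = our + gainSum Bl H t ∧
    (loopA Bl H HT our cnt t).2.2.2 = cnt + cntSum Bl H t := by
  intro N
  induction N using Nat.strong_induction_on with
  | _ N ih =>
    intro Bl H HT our cnt hN hInv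
    match H with
    | [] =>
      rw [loopA]
      refine ⟨?_, by simp [gainSum], by simp [cntSum]⟩
      unfold applySteal idsOf
      apply List.ext_getElem (by simp)
      intro j h1 h2
      simp
    | nd :: rest =>
      obtain ⟨hnd0, hnd1, hnd2, hnd3, hnd4⟩ := hInv.2 nd (List.mem_cons_self)
      set j := nd.1.toNat with hj
      set arr := Bl.getD j [] with harr
      have hsum : t ≤ arr.sum := by rw [← hnd2]; exact hnd3
      have hne : arr ≠ [] := DOK_ne_nil hnd4 hsum
      set v := arr.getLast hne with hv
      have hlv : arr.getLast? = some v := List.getLast?_eq_some_getLast hne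
      have hdl : arr.dropLast.sum = arr.sum - v := sum_dropLast_of_getLast? arr v hlv
      set Bl' := Bl.set j arr.dropLast with hBl'
      have hlen' : Bl'.length = Bl.length := by rw [hBl']; simp
      have hspec := getMaximumA_spec Bl nd rest t hnd0 hnd1 hne
      have hndid : nd.1 ∉ rest.map Prod.fst := by
        have := hInv.1
        simp only [List.map_cons, List.nodup_cons] at this
        exact this.1
      have hrest_ne : ∀ m ∈ rest, m.1 ≠ nd.1 := by
        intro m hm hc
        exact hndid (hc ▸ List.mem_map_of_mem hm)
      have hrest_getD : ∀ m ∈ rest, Bl'.getD m.1.toNat [] = Bl.getD m.1.toNat [] := by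
        intro m hm
        obtain ⟨hm0, -, -, -, -⟩ := hInv.2 m (List.mem_cons_of_mem _ hm)
        exact getD_set_ne Bl j m.1.toNat arr.dropLast (by
          intro hc
          exact hrest_ne m hm (by omega))
      have hmapG : rest.map (fun m => (dsteal (Bl'.getD m.1.toNat []) t).2.1)
          = rest.map (fun m => (dsteal (Bl.getD m.1.toNat []) t).2.1) :=
        List.map_congr_left (fun m hm => by rw [hrest_getD m hm])
      have hmapC : rest.map (fun m => (dsteal (Bl'.getD m.1.toNat []) t).2.2)
          = rest.map (fun m => (dsteal (Bl.getD m.1.toNat []) t).2.2) :=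
        List.map_congr_left (fun m hm => by rw [hrest_getD m hm])
      have hInvRest : ∀ m ∈ rest, 0 ≤ m.1 ∧ m.1.toNat < Bl'.length ∧
          m.2 = (Bl'.getD m.1.toNat []).sum ∧ t ≤ m.2 ∧ DOK (Bl'.getD m.1.toNat []) t := by
        intro m hm
        obtain ⟨a1, a2, a3, a4, a5⟩ := hInv.2 m (List.mem_cons_of_mem _ hm)
        rw [hrest_getD m hm]
        exact ⟨a1, by omega, a3, a4, a5⟩
      have hdllen : arr.dropLast.length < arr.length := by
        have := List.length_pos_iff.2 hne
        simp only [List.length_dropLast]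
        omega
      have hshrink : (Bl'.map List.length).sum < (Bl.map List.length).sum := by
        rw [hBl']
        apply sum_len_set_lt Bl j hnd1 arr.dropLast
        rw [← harr]
        exact hdllen
      have hheadD : Bl'.getD j [] = arr.dropLast := getD_set_self Bl j _ hnd1
      have hgetBlj : Bl.getD nd.1.toNat [] = arr := by rw [← hj, ← harr]
      have hds : dsteal arr t = ((dsteal arr.dropLast t).1, (dsteal arr.dropLast t).2.1 + v,
          (dsteal arr.dropLast t).2.2 + 1) := dsteal_ge arr t v hsum hlv
      rw [loopA]
      split
      · next heq => rw [heq] at hspec; exact absurd hspec (by simp)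
      · next Bl2 T2 idx2 v2 heq =>
        rw [heq] at hspec
        simp only [Option.some.injEq, Prod.mk.injEq] at hspec
        obtain ⟨e1, e2, e3, e4⟩ := hspec
        subst e1 e3 e4
        by_cases hlt : nd.2 - v < t
        · -- tower finished: its node is removed (last heap entry swapped to the front)
          rw [if_pos hlt] at e2
          have hdl_lt : arr.dropLast.sum < t := by omega
          have hds0 : dsteal arr.dropLast t = (arr.dropLast, 0, 0) := dsteal_lt _ _ hdl_lt
          have hperm : T2.Perm rest := by
            cases hr : rest.getLast? with
            | none =>
              have hrnil : rest = [] := List.getLast?_eq_none_iff.1 hr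
              subst hrnil
              simp only [List.getLast?_nil] at e2
              rw [e2]
            | some lst =>
              obtain ⟨l', rfl⟩ := List.getLast?_eq_some_iff.1 hr
              rw [hr] at e2
              simp only [List.dropLast_concat] at e2
              rw [e2]
              exact (List.perm_append_singleton lst l').symm
          have hidsperm : (T2.map Prod.fst).Perm (rest.map Prod.fst) := hperm.map _
          have hInv' : InvA Bl' T2 t := by
            refine ⟨hidsperm.nodup_iff.2 (List.nodup_cons.1 (by simpa using hInv.1)).2, ?_⟩
            intro m hm
            exact hInvRest m (hperm.mem_iff.1 hm)
          obtain ⟨r1, r2, r3⟩ := ih ((Bl'.map List.length).sum) (by omega) Bl' T2 _ (our + v)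
            (cnt + 1) le_rfl hInv'
          have hmem_ids : ∀ x, x ∈ idsOf T2 ↔ x ∈ idsOf rest := fun x => hidsperm.mem_iff
          have hhead1 : (dsteal (Bl.getD nd.1.toNat []) t).1 = arr.dropLast := by
            rw [hgetBlj, hds, hds0]
          have hheadG : (dsteal (Bl.getD nd.1.toNat []) t).2.1 = v := by
            rw [hgetBlj, hds, hds0]; norm_num
          have hheadC : (dsteal (Bl.getD nd.1.toNat []) t).2.2 = 1 := by
            rw [hgetBlj, hds, hds0]; norm_num
          refine ⟨?_, ?_, ?_⟩
          · rw [r1, applySteal_congr Bl' (idsOf T2) (idsOf rest) t hmem_ids]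
            unfold applySteal
            apply List.ext_getElem (by simpa using hlen')
            intro k hk1 hk2
            simp only [List.getElem_mapIdx]
            by_cases hkj : k = j
            · subst hkj
              have hkid : ((j : Nat) : Int) = nd.1 := by omega
              have hmem2 : ((j : Nat) : Int) ∉ idsOf rest := by
                rw [hkid]; simpa [idsOf] using hndid
              have hmem1 : ((j : Nat) : Int) ∈ idsOf (nd :: rest) := by
                rw [hkid]; simp [idsOf]
              rw [if_neg hmem2, if_pos hmem1]
              have hb1 : Bl'[j]'(hlen' ▸ hnd1) = arr.dropLast := by
                simp only [hBl']
                exact List.getElem_set_self _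
              have hb2 : Bl[j]'hnd1 = arr := by
                rw [harr]; exact (List.getD_eq_getElem Bl [] hnd1).symm
              rw [hb1, hb2, hds, hds0]
            · have hkb : k < Bl.length := by simpa using hk2
              have hkb' : k < Bl'.length := by omega
              have hbk : Bl'[k]'hkb' = Bl[k]'hkb := by
                simp only [hBl']
                exact List.getElem_set_ne (show j ≠ k from by omega) (by simpa using hkb)
              have hmm : ((k : Int) ∈ idsOf (nd :: rest)) ↔ ((k : Int) ∈ idsOf rest) := by
                simp only [idsOf, List.map_cons, List.mem_cons]
                constructor
                · rintro (hc | hc)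
                  · exfalso; omega
                  · exact hc
                · exact Or.inr
              rw [hbk]
              by_cases hmem : (k : Int) ∈ idsOf rest
              · rw [if_pos hmem, if_pos (hmm.2 hmem)]
              · rw [if_neg hmem, if_neg (fun hc => hmem (hmm.1 hc))]
          · rw [r2]
            have hgr : gainSum Bl' T2 t = gainSum Bl rest t := by
              unfold gainSum
              rw [List.Perm.sum_eq (hperm.map _)]
              rw [hmapG]
            have hexp : gainSum Bl (nd :: rest) t
                = (dsteal (Bl.getD nd.1.toNat []) t).2.1 + gainSum Bl rest t := by
              simp [gainSum]
            rw [hgr, hexp, hheadG]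
            omega
          · rw [r3]
            have hgr : cntSum Bl' T2 t = cntSum Bl rest t := by
              unfold cntSum
              rw [List.Perm.sum_eq (hperm.map _)]
              rw [hmapC]
            have hexp : cntSum Bl (nd :: rest) t
                = (dsteal (Bl.getD nd.1.toNat []) t).2.2 + cntSum Bl rest t := by
              simp [cntSum]
            rw [hgr, hexp, hheadC]
            omega
        · -- tower still ≥ t: its node stays at the front with its height reduced
          rw [if_neg hlt] at e2
          have hInv' : InvA Bl' T2 t := by
            rw [e2]
            constructor
            · simpa using hInv.1
            · intro m hm
              rcases List.mem_cons.1 hm with rfl | hm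
              · refine ⟨by simpa using hnd0, by simpa using (by omega : nd.1.toNat < Bl'.length),
                  ?_, (by omega : t ≤ nd.2 - v), ?_⟩
                · show nd.2 - v = (Bl'.getD (nd.1, nd.2 - v).1.toNat []).sum
                  simp only []
                  rw [← hj, hheadD]
                  omega
                · show DOK (Bl'.getD (nd.1, nd.2 - v).1.toNat []) t
                  simp only []
                  rw [← hj, hheadD]
                  exact DOK_dropLast hnd4 hsum
              · exact hInvRest m hm
          obtain ⟨r1, r2, r3⟩ := ih ((Bl'.map List.length).sum) (by omega) Bl' T2 _ (our + v)
            (cnt + 1) le_rfl hInv'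
          have hids : idsOf T2 = idsOf (nd :: rest) := by
            rw [e2]; simp [idsOf]
          have hheadG' : (dsteal (Bl.getD nd.1.toNat []) t).2.1
              = (dsteal arr.dropLast t).2.1 + v := by rw [hgetBlj, hds]
          have hheadC' : (dsteal (Bl.getD nd.1.toNat []) t).2.2
              = (dsteal arr.dropLast t).2.2 + 1 := by rw [hgetBlj, hds]
          refine ⟨?_, ?_, ?_⟩
          · rw [r1, hids]
            unfold applySteal
            apply List.ext_getElem (by simpa using hlen')
            intro k hk1 hk2
            simp only [List.getElem_mapIdx]
            by_cases hkj : k = j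
            · subst hkj
              have hkid : ((j : Nat) : Int) = nd.1 := by omega
              have hmem : ((j : Nat) : Int) ∈ idsOf (nd :: rest) := by
                rw [hkid]; simp [idsOf]
              rw [if_pos hmem, if_pos hmem]
              have hb1 : Bl'[j]'(hlen' ▸ hnd1) = arr.dropLast := by
                simp only [hBl']
                exact List.getElem_set_self _
              have hb2 : Bl[j]'hnd1 = arr := by
                rw [harr]; exact (List.getD_eq_getElem Bl [] hnd1).symm
              rw [hb1, hb2, hds]
            · have hkb : k < Bl.length := by simpa using hk2
              have hkb' : k < Bl'.length := by omega
              have hbk : Bl'[k]'hkb' = Bl[k]'hkb := by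
                simp only [hBl']
                exact List.getElem_set_ne (show j ≠ k from by omega) (by simpa using hkb)
              rw [hbk]
          · rw [r2, e2]
            have hexp' : gainSum Bl' ((nd.1, nd.2 - v) :: rest) t
                = (dsteal arr.dropLast t).2.1 + gainSum Bl rest t := by
              unfold gainSum
              simp only [List.map_cons, List.sum_cons]
              rw [show Bl'.getD nd.1.toNat [] = arr.dropLast from by rw [← hj]; exact hheadD]
              rw [hmapG]
            have hexp : gainSum Bl (nd :: rest) t
                = (dsteal (Bl.getD nd.1.toNat []) t).2.1 + gainSum Bl rest t := by
              simp [gainSum]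
            rw [hexp', hexp, hheadG']
            omega
          · rw [r3, e2]
            have hexp' : cntSum Bl' ((nd.1, nd.2 - v) :: rest) t
                = (dsteal arr.dropLast t).2.2 + cntSum Bl rest t := by
              unfold cntSum
              simp only [List.map_cons, List.sum_cons]
              rw [show Bl'.getD nd.1.toNat [] = arr.dropLast from by rw [← hj]; exact hheadD]
              rw [hmapC]
            have hexp : cntSum Bl (nd :: rest) t
                = (dsteal (Bl.getD nd.1.toNat []) t).2.2 + cntSum Bl rest t := by
              simp [cntSum]
            rw [hexp', hexp, hheadC']
            omega

theorem loop2AB (xs : List Int) : ∀ (our cnt t : Int),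
    loop2A xs our cnt t = loop2B xs.reverse our cnt t := by
  induction xs using List.reverseRecOn with
  | nil =>
    intro our cnt t
    rw [loop2A]
    simp [loop2B]
  | append_singleton ys x ih =>
    intro our cnt t
    rw [loop2A]
    by_cases hc : our < t
    · rw [dif_pos ⟨by simp, hc⟩]
      rw [PySem.List.pyGetD_neg_one_append_singleton, List.dropLast_concat, List.reverse_append]
      simp only [List.reverse_cons, List.reverse_nil, List.nil_append, List.singleton_append]
      rw [ih (our + x) (cnt + 1) t]
      simp only [loop2B]
      rw [if_neg (by omega)]
    · rw [dif_neg (by simp [hc])]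
      rw [List.reverse_append]
      simp [loop2B, not_lt.1 hc]

theorem foldB_char (t : Int) (l : List (List Int)) : ∀ (acc : List (List Int) × Int × Int),
    l.foldl (fun acc arr =>
      ((acc.1 ++ [(stealLoop arr arr.sum t).1],
        acc.2.1 + (stealLoop arr arr.sum t).2.1,
        acc.2.2 + (stealLoop arr arr.sum t).2.2))) acc
    = (acc.1 ++ l.map (fun arr => (dsteal arr t).1),
       acc.2.1 + (l.map (fun arr => (dsteal arr t).2.1)).sum,
       acc.2.2 + (l.map (fun arr => (dsteal arr t).2.2)).sum) := by
  induction l with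
  | nil => intro acc; simp
  | cons a as ihl =>
    intro acc
    rw [List.foldl_cons, ihl]
    simp [dsteal, add_assoc]

theorem sum_filter_zero (l : List Int) (p : Int → Prop) [DecidablePred p] (g : Int → Int)
    (h : ∀ a ∈ l, ¬ p a → g a = 0) :
    ((l.filter (fun a => decide (p a))).map g).sum = (l.map g).sum := by
  induction l with
  | nil => simp
  | cons a as ihl =>
    have htail := ihl (fun b hb => h b (List.mem_cons_of_mem _ hb))
    by_cases hp : p a
    · simp only [List.filter_cons, hp, decide_true, if_true, List.map_cons, List.sum_cons, htail]
    · have h0 : g a = 0 := h a List.mem_cons_self hp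
      rw [List.filter_cons, if_neg (by simp [hp]), htail, List.map_cons, List.sum_cons, h0,
        zero_add]

-- ===== VERDICT (by name: the statement is the Claim_ definition above) =====
set_option maxHeartbeats 1000000 in
theorem Towers_spec : Claim_equal_Towers := by
  unfold Claim_equal_Towers
  intro B W t hDom hPre
  unfold Spec_Towers Towers Towers_alt
  dsimp only
  set Bs := B.map (fun arr => PySem.List.sorted arr (fun x => x) false) with hBs
  set HT := (PySem.List.pyRange 0 (Bs.length : Int) 1).map
    (fun a => (PySem.List.pyGetD Bs a []).sum) with hHTdef
  rw [buildHeapA_id]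
  rw [PySem.List.foldl_append_ite (fun a => t ≤ PySem.List.pyGetD HT a 0)
    (fun a => (a, PySem.List.pyGetD HT a 0))]
  rw [List.nil_append]
  set Heap0 := ((PySem.List.pyRange 0 (Bs.length : Int) 1).filter
      (fun x => decide (t ≤ PySem.List.pyGetD HT x 0))).map
    (fun a => (a, PySem.List.pyGetD HT a 0)) with hHeap0
  have hHTa : ∀ a : Int, 0 ≤ a → a < (Bs.length : Int) →
      PySem.List.pyGetD HT a 0 = (Bs.getD a.toNat []).sum := by
    intro a h0 h1
    rw [hHTdef]
    rw [PySem.List.pyGetD_map_pyRange_of_nonneg _ _ _ _ h0 h1]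
    rw [PySem.List.pyGetD_eq_getElem Bs [] h0 (by exact_mod_cast h1)]
    rw [List.getD_eq_getElem _ _ (by omega)]
  have hmemids : ∀ x : Int, (x ∈ idsOf Heap0) ↔
      (0 ≤ x ∧ x < (Bs.length : Int) ∧ t ≤ PySem.List.pyGetD HT x 0) := by
    intro x
    rw [hHeap0]
    simp only [idsOf, List.map_map]
    rw [show (Prod.fst ∘ fun a : Int => (a, PySem.List.pyGetD HT a 0)) = id from rfl, List.map_id]
    simp [List.mem_filter, PySem.List.mem_pyRange_one, and_assoc]
  have hInv0 : InvA Bs Heap0 t := by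
    constructor
    · rw [hHeap0]
      simp only [List.map_map]
      rw [show (Prod.fst ∘ fun a : Int => (a, PySem.List.pyGetD HT a 0)) = id from rfl, List.map_id]
      exact (PySem.List.nodup_pyRange_one _ _).filter _
    · intro m hm
      rw [hHeap0] at hm
      obtain ⟨a, ha, rfl⟩ := List.mem_map.1 hm
      obtain ⟨haR, haP⟩ := List.mem_filter.1 ha
      rw [PySem.List.mem_pyRange_one] at haR
      obtain ⟨ha0, han⟩ := haR
      have hp : t ≤ PySem.List.pyGetD HT a 0 := of_decide_eq_true haP
      have hsum := hHTa a ha0 han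
      have hlt : a.toNat < Bs.length := by omega
      have hlb : a.toNat < B.length := by rw [hBs] at hlt; simpa using hlt
      have hBsk : Bs.getD a.toNat [] = PySem.List.sorted (B.getD a.toNat []) (fun x => x) false := by
        rw [List.getD_eq_getElem _ _ hlt, List.getD_eq_getElem _ _ hlb]
        simp only [hBs, List.getElem_map]
      have hmemB : B.getD a.toNat [] ∈ B := by
        rw [List.getD_eq_getElem _ _ hlb]
        exact List.getElem_mem _
      obtain ⟨k, hk, hks⟩ := hPre _ hmemB
      refine ⟨ha0, hlt, hsum, hp, ?_⟩
      exact ⟨k, by rw [hBsk, PySem.List.length_sorted]; exact hk, by rw [hBsk]; exact hks⟩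
  obtain ⟨r1, r2, r3⟩ := loopA_char_aux t ((Bs.map List.length).sum) Bs Heap0 HT W.sum 0
    le_rfl hInv0
  rw [r1, r2, r3, foldB_char]
  dsimp only
  have hsum_gen : ∀ g : List Int → Int, (∀ arr, arr.sum < t → g arr = 0) →
      (Heap0.map (fun nd => g (Bs.getD nd.1.toNat []))).sum = (Bs.map g).sum := by
    intro g hg
    rw [hHeap0, List.map_map]
    rw [show ((fun nd : Int × Int => g (Bs.getD nd.1.toNat [])) ∘
        fun a : Int => (a, PySem.List.pyGetD HT a 0)) = fun a : Int => g (Bs.getD a.toNat [])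
      from rfl]
    rw [sum_filter_zero _ (fun a => t ≤ PySem.List.pyGetD HT a 0) _ ?_]
    · have hstep : (PySem.List.pyRange 0 (Bs.length : Int) 1).map
          (fun a => g (Bs.getD a.toNat []))
          = (PySem.List.pyRange 0 (Bs.length : Int) 1).map
            (fun a => g (PySem.List.pyGetD Bs a [])) := by
        apply List.map_congr_left
        intro a ha
        rw [PySem.List.mem_pyRange_one] at ha
        congr 1
        rw [PySem.List.pyGetD_eq_getElem Bs [] ha.1 (by exact_mod_cast ha.2),
          List.getD_eq_getElem _ _ (by omega)]
      rw [hstep]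
      rw [show (fun a : Int => g (PySem.List.pyGetD Bs a []))
          = g ∘ (fun a : Int => PySem.List.pyGetD Bs a []) from rfl]
      rw [← List.map_map]
      rw [PySem.List.map_pyGetD_pyRange_zero']
    · intro a ha hna
      rw [PySem.List.mem_pyRange_one] at ha
      apply hg
      have := hHTa a ha.1 ha.2
      omega
  have h1 : applySteal Bs (idsOf Heap0) t = Bs.map (fun arr => (dsteal arr t).1) := by
    unfold applySteal
    apply List.ext_getElem (by simp)
    intro k hk1 hk2
    simp only [List.getElem_mapIdx, List.getElem_map]
    have hkB : k < Bs.length := by simpa using hk2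
    by_cases hp : t ≤ PySem.List.pyGetD HT (k : Int) 0
    · rw [if_pos ((hmemids _).2 ⟨by omega, by exact_mod_cast hkB, hp⟩)]
    · rw [if_neg (fun hc => hp ((hmemids _).1 hc).2.2)]
      have hk' := hHTa k (by omega) (by exact_mod_cast hkB)
      rw [hk'] at hp
      rw [Int.toNat_natCast, List.getD_eq_getElem _ _ hkB] at hp
      rw [dsteal_lt _ _ (by omega)]
  have h2 : gainSum Bs Heap0 t = (Bs.map (fun arr => (dsteal arr t).2.1)).sum := by
    unfold gainSum
    exact hsum_gen (fun arr => (dsteal arr t).2.1) (fun arr h => by simp [dsteal_lt _ _ h])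
  have h3 : cntSum Bs Heap0 t = (Bs.map (fun arr => (dsteal arr t).2.2)).sum := by
    unfold cntSum
    exact hsum_gen (fun arr => (dsteal arr t).2.2) (fun arr h => by simp [dsteal_lt _ _ h])
  rw [h1, h2, h3]
  simp only [List.nil_append]
  rw [loop2AB]
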